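-- pv_equiv track=rewrite | github.com/waltman/advent-of-code-2017 | day04/high_entropy.py | is_valid2
-- ===== SOURCE A (Python) =====
-- def is_valid2(line):
--     s = set()
--     keys = [''.join(sorted(list(pw))) for pw in line.split()]
--     for key in keys:
--         if key in s:
--             return 0
--         else:
--             s.add(key)
--
--     return 1
-- ===== SOURCE B (Python) =====
-- def is_valid2(line):
--     keys = sorted(''.join(sorted(pw)) for pw in line.split())
--     for a, b in zip(keys, keys[1:]):
--         if a == b:
--             return 0
--     return 1
-- ===== Notes on version B (the rewrite author's own statement) =====
-- stated objective: alternative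
-- what changed: Replaces the running hash-set membership dedup with sorting the anagram keys once and scanning adjacent pairs for an equal neighbour.
import Mathlib
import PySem

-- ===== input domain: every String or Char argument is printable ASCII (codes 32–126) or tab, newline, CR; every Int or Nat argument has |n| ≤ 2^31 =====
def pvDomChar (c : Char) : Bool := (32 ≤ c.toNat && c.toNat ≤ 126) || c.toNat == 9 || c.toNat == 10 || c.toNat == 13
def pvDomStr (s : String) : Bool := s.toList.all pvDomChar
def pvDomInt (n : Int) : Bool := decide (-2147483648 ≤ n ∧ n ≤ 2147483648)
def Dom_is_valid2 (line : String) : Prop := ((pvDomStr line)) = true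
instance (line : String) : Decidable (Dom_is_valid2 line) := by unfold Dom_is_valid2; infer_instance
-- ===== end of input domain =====

-- B replaces A's running hash-set membership dedup with sort-the-keys-then-scan-adjacent-pairs; alternative, not faster.

-- ===== PORT A =====
-- ''.join(sorted(list(pw)))
def pvSig (pw : String) : String := String.ofList (PySem.List.sorted pw.toList (fun c => c) false)

-- the 'for key in keys' loop with early return
def pvGoA : List String → PySem.Set String → Int
  | [], _ => 1
  | k :: rest, s => if PySem.Set.contains s k then 0 else pvGoA rest (PySem.Set.add s k)

def is_valid2 (line : String) : Int :=
  let keys := (PySem.Str.split₀ line).map pvSig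
  pvGoA keys PySem.Set.empty

-- ===== PORT B =====
-- 'for a, b in zip(keys, keys[1:])' adjacent-pair scan
def pvScanB : List String → Int
  | a :: b :: rest => if a == b then 0 else pvScanB (b :: rest)
  | _ => 1

def is_valid2_alt (line : String) : Int :=
  let keys := PySem.List.sorted ((PySem.Str.split₀ line).map pvSig) (fun x => x) false
  pvScanB keys

-- ===== PRECONDITION & SPEC =====
def Spec_is_valid2 (line : String) (out : Int) : Prop := out = is_valid2_alt line
instance (line : String) (out : Int) : Decidable (Spec_is_valid2 line out) := by unfold Spec_is_valid2; infer_instance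

-- ===== CLAIM (what is proved, stated in full; the proofs are below) =====
def Claim_equal_is_valid2 : Prop := ∀ (line : String), Dom_is_valid2 line → Spec_is_valid2 line (is_valid2 line)

-- ===== LEMMAS AND PROOFS =====
lemma pvGoA_eq (keys : List String) : ∀ (s : PySem.Set String),
    pvGoA keys s = if keys.Nodup ∧ ∀ k ∈ keys, k ∉ s then 1 else 0 := by
  induction keys with
  | nil => intro s; simp [pvGoA]
  | cons k rest ih =>
    intro s
    by_cases hk : k ∈ s
    · have hc : PySem.Set.contains s k = true := by
        simp [PySem.Set.contains_eq_listContains, hk]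
      simp only [pvGoA, hc, if_true]
      rw [if_neg]
      rintro ⟨-, hall⟩
      exact hall k (List.mem_cons_self ..) hk
    · have hc : PySem.Set.contains s k = false := by
        simp [PySem.Set.contains_eq_listContains, hk]
      simp only [pvGoA, hc, Bool.false_eq_true, if_false, ih]
      refine if_congr ?_ rfl rfl
      rw [List.nodup_cons]
      constructor
      · rintro ⟨hn, hall⟩
        have hall' : ∀ x ∈ rest, x ∉ s ∧ x ≠ k := by
          intro x hx
          have hx2 := hall x hx
          rw [PySem.Set.mem_add] at hx2
          push Not at hx2
          exact hx2
        refine ⟨⟨fun hm => (hall' k hm).2 rfl, hn⟩, ?_⟩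
        intro x hx
        rcases List.mem_cons.mp hx with rfl | hx'
        · exact hk
        · exact (hall' x hx').1
      · rintro ⟨⟨hkr, hn⟩, hall⟩
        refine ⟨hn, fun x hx => ?_⟩
        rw [PySem.Set.mem_add]
        rintro (hm | rfl)
        · exact hall x (List.mem_cons_of_mem _ hx) hm
        · exact hkr hx

lemma pvScanB_eq (l : List String) (hs : l.Pairwise (· ≤ ·)) :
    pvScanB l = if l.Nodup then 1 else 0 := by
  induction l with
  | nil => simp [pvScanB]
  | cons a t iht =>
    cases t with
    | nil => simp [pvScanB]
    | cons b rest =>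
      rcases List.pairwise_cons.mp hs with ⟨hab, ht⟩
      by_cases h : a = b
      · subst h
        simp [pvScanB]
      · have hne : (a == b) = false := by simpa using h
        rw [pvScanB.eq_def]
        simp only [hne, Bool.false_eq_true, if_false, iht ht]
        refine if_congr ?_ rfl rfl
        rw [List.nodup_cons (a := a)]
        have key : a ∉ b :: rest := by
          intro hmem
          rcases List.mem_cons.mp hmem with rfl | ha
          · exact h rfl
          · exact h (le_antisymm (hab b (List.mem_cons_self ..)) ((List.pairwise_cons.mp ht).1 a ha))
        exact ⟨fun hn => ⟨key, hn⟩, fun h2 => h2.2⟩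

-- ===== VERDICT (by name: the statement is the Claim_ definition above) =====
theorem is_valid2_spec : Claim_equal_is_valid2 := by
  intro line _
  unfold Spec_is_valid2 is_valid2 is_valid2_alt
  set keys := (PySem.Str.split₀ line).map pvSig with hkeys
  have hperm : (PySem.List.sorted keys (fun x => x) false).Perm keys := PySem.List.sorted_perm ..
  rw [pvGoA_eq, pvScanB_eq _ (PySem.List.sorted_pairwise ..)]
  refine if_congr ?_ rfl rfl
  simp [PySem.Set.empty, hperm.nodup_iff]
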